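-- pv_equiv track=rewrite | github.com/neurospin/neurospin_to_bids | src/neurospin_to_bids/bids.py | _find_insertion_position
-- ===== SOURCE A (Python) =====
-- BIDS_ENTITY_ORDER = [
--     'sub',
--     'ses',
--     'sample',
--     'task',
--     'acq',
--     'ce',
--     'trc',
--     'stain',
--     'rec',
--     'dir',
--     'run',
--     'mod',
--     'echo',
--     'flip',
--     'inv',
--     'mt',
--     'part',
--     'proc',
--     'hemi',
--     'space',
--     'split',
--     'recording',
--     'chunk',
--     'atlas',
--     'res',
--     'den',
--     'label',
--     'desc',
-- ]
--
-- def _find_insertion_position(entity_list, key):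
--     try:
--         key_index = BIDS_ENTITY_ORDER.index(key)
--     except ValueError:
--         return len(entity_list)  # insert unknown entities last
--     # Look for the first key in entity_list that precedes the key, in the sense
--     # of BIDS_ENTITY_ORDER, and return its index + 1.
--     entity_list_keys = {k: i for i, (k, v) in enumerate(entity_list)}
--     for candidate_key in reversed(BIDS_ENTITY_ORDER[:key_index]):
--         if candidate_key in entity_list_keys:
--             return entity_list_keys[candidate_key] + 1
--     return 0
-- ===== SOURCE B (Python) =====
-- BIDS_ENTITY_ORDER = [
--     'sub',
--     'ses',
--     'sample',
--     'task',
--     'acq',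
--     'ce',
--     'trc',
--     'stain',
--     'rec',
--     'dir',
--     'run',
--     'mod',
--     'echo',
--     'flip',
--     'inv',
--     'mt',
--     'part',
--     'proc',
--     'hemi',
--     'space',
--     'split',
--     'recording',
--     'chunk',
--     'atlas',
--     'res',
--     'den',
--     'label',
--     'desc',
-- ]
--
-- _BIDS_RANK = {k: i for i, k in enumerate(BIDS_ENTITY_ORDER)}
--
--
-- def _find_insertion_position(entity_list, key):
--     key_index = _BIDS_RANK.get(key)
--     if key_index is None:
--         return len(entity_list)  # insert unknown entities last
--     # One forward pass: keep the last occurrence of the highest-ranked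
--     # entity that precedes `key` in BIDS_ENTITY_ORDER ('>=' keeps the
--     # last index among duplicates of the same key).
--     best_rank = -1
--     best_index = -1
--     for i, (k, v) in enumerate(entity_list):
--         r = _BIDS_RANK.get(k)
--         if r is not None and r < key_index and r >= best_rank:
--             best_rank = r
--             best_index = i
--     return best_index + 1 if best_index >= 0 else 0
-- ===== Notes on version B (the rewrite author's own statement) =====
-- stated objective: alternative
-- what changed: A builds a dict of entity_list keys on every call and scans the constant BIDS_ENTITY_ORDER backwards from the key's rank; B precomputes a constant rank table once and makes a single forward pass over entity_list keeping the last occurrence of the highest-ranked predecessor.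
import Mathlib
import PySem

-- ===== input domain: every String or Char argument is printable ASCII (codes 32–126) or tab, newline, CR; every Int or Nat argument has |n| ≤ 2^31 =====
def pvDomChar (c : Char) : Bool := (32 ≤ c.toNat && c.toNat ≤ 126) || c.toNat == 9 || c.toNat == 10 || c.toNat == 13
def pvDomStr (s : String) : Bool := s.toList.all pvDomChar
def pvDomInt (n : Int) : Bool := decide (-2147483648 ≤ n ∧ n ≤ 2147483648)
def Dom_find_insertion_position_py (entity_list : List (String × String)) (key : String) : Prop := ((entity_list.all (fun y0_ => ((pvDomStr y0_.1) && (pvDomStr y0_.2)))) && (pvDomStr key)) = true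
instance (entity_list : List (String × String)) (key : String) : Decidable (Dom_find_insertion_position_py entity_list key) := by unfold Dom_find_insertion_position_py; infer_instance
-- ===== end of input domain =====

-- B replaces A's per-call dict over entity_list plus a backward scan of the constant
-- BIDS_ENTITY_ORDER by a precomputed rank table and one forward best-predecessor pass
-- over entity_list (objective: alternative decomposition).


-- ===== PORT A =====
def bidsEntityOrder : List String :=
  ["sub", "ses", "sample", "task", "acq", "ce", "trc", "stain", "rec", "dir",
   "run", "mod", "echo", "flip", "inv", "mt", "part", "proc", "hemi", "space",
   "split", "recording", "chunk", "atlas", "res", "den", "label", "desc"]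

-- the 'for candidate_key in reversed(...)' loop with its early return
def pvALoop (d : PySem.Dict String Int) : List String → Int
  | [] => 0
  | c :: rest =>
    match d.get? c with
    | some i => i + 1
    | none => pvALoop d rest

-- entity_list_keys = {k: i for i, (k, v) in enumerate(entity_list)}
def pvADict (entity_list : List (String × String)) : PySem.Dict String Int :=
  (PySem.List.enumerate entity_list 0).foldl (fun d p => d.insert p.2.1 p.1) PySem.Dict.empty

def find_insertion_position_py (entity_list : List (String × String)) (key : String) : Int :=
  match PySem.List.index? bidsEntityOrder key with
  | none => (entity_list.length : Int)   -- except ValueError: insert unknown entities last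
  | some key_index =>
    pvALoop (pvADict entity_list)
      ((PySem.List.slice bidsEntityOrder none (some (key_index : Int))).reverse)

-- ===== PORT B =====
-- _BIDS_RANK = {k: i for i, k in enumerate(BIDS_ENTITY_ORDER)}
def bidsRank : PySem.Dict String Int :=
  (PySem.List.enumerate bidsEntityOrder 0).foldl (fun d p => d.insert p.2 p.1) PySem.Dict.empty

-- the body of B's forward loop: update (best_rank, best_index)
def pvBStep (key_index : Int) (st : Int × Int) (p : Int × (String × String)) : Int × Int :=
  match bidsRank.get? p.2.1 with
  | some r => if r < key_index ∧ st.1 ≤ r then (r, p.1) else st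
  | none => st

def pvBFold (key_index : Int) (entity_list : List (String × String)) : Int × Int :=
  (PySem.List.enumerate entity_list 0).foldl (pvBStep key_index) (-1, -1)

def find_insertion_position_py_alt (entity_list : List (String × String)) (key : String) : Int :=
  match bidsRank.get? key with
  | none => (entity_list.length : Int)
  | some key_index =>
    let st := pvBFold key_index entity_list
    if st.2 ≥ 0 then st.2 + 1 else 0

-- ===== PRECONDITION & SPEC =====
def Spec_find_insertion_position_py (entity_list : List (String × String)) (key : String) (out : Int) : Prop := out = find_insertion_position_py_alt entity_list key
instance (entity_list : List (String × String)) (key : String) (out : Int) : Decidable (Spec_find_insertion_position_py entity_list key out) := by unfold Spec_find_insertion_position_py; infer_instance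

-- ===== CLAIM (what is proved, stated in full; the proofs are below) =====
def Claim_equal_find_insertion_position_py : Prop := ∀ (entity_list : List (String × String)) (key : String), Dom_find_insertion_position_py entity_list key → Spec_find_insertion_position_py entity_list key (find_insertion_position_py entity_list key)

-- ===== LEMMAS AND PROOFS =====

-- the key string of rank r
def pvOKey (r : Nat) : String := bidsEntityOrder.getD r ""

theorem pv_dictOf_get? (os : List String) (h : os.Nodup) (key : String) :
    ((PySem.List.enumerate os 0).foldl (fun d p => d.insert p.2 p.1) PySem.Dict.empty).get? key
      = (PySem.List.index? os key).map (fun n : Nat => (n : Int)) := by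
  induction os using List.reverseRecOn with
  | nil =>
      simp [PySem.List.enumerate_nil, PySem.Dict.get?_empty, PySem.List.index?_eq_idxOf?]
  | append_singleton os c ih =>
      rw [List.nodup_append] at h
      obtain ⟨hn, -, hdisj⟩ := h
      have hcnot : c ∉ os := fun hc => hdisj c hc c (by simp) rfl
      rw [PySem.List.enumerate_append, List.foldl_append]
      simp only [PySem.List.enumerate_cons, PySem.List.enumerate_nil, List.foldl_cons,
        List.foldl_nil]
      rw [PySem.Dict.get?_insert]
      by_cases hkc : key = c
      · subst hkc
        rw [PySem.List.index?_append_singleton_self os key hcnot]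
        simp
      · rw [if_neg hkc, ih hn]
        by_cases hmem : key ∈ os
        · rw [PySem.List.index?_append_of_mem [c] hmem]
        · have h1 : PySem.List.index? os key = none := by
            rw [PySem.List.index?_eq_idxOf?]
            exact List.idxOf?_eq_none_iff.mpr hmem
          have h2 : PySem.List.index? (os ++ [c]) key = none := by
            rw [PySem.List.index?_eq_idxOf?]
            refine List.idxOf?_eq_none_iff.mpr ?_
            simp only [List.mem_append, List.mem_singleton]
            rintro (hk | hk)
            · exact hmem hk
            · exact hkc hk
          rw [h1, h2]

theorem pv_rank_eq (key : String) :
    bidsRank.get? key = (PySem.List.index? bidsEntityOrder key).map (fun n : Nat => (n : Int)) := by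
  exact pv_dictOf_get? bidsEntityOrder (by decide) key

theorem pv_rank_okey : ∀ r < 28, bidsRank.get? (pvOKey r) = some (r : Int) := by
  decide

theorem pv_len_order : bidsEntityOrder.length = 28 := by decide

theorem pv_getElem?_okey : ∀ r < 28, bidsEntityOrder[r]? = some (pvOKey r) := by decide

theorem pv_okey_inj {r r' : Nat} (h1 : r < 28) (h2 : r' < 28) (he : pvOKey r = pvOKey r') :
    r = r' := by
  have a := pv_rank_okey r h1
  have b := pv_rank_okey r' h2
  rw [he, b] at a
  have := Option.some.inj a
  omega

theorem pv_rank_some {k : String} {ri : Int} (h : bidsRank.get? k = some ri) :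
    ∃ r : Nat, ri = (r : Int) ∧ r < 28 ∧ k = pvOKey r := by
  rw [pv_rank_eq] at h
  cases hi : PySem.List.index? bidsEntityOrder k with
  | none => rw [hi, Option.map_none] at h; exact absurd h (by simp)
  | some n =>
      rw [hi, Option.map_some] at h
      have h : (n : Int) = ri := Option.some.inj h
      obtain ⟨hk, hget, -⟩ := PySem.List.getElem_of_index?_eq_some hi
      have hn28 : n < 28 := by rw [pv_len_order] at hk; exact hk
      refine ⟨n, h.symm, hn28, ?_⟩
      have := pv_getElem?_okey n hn28
      rw [List.getElem?_eq_getElem hk, hget] at this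
      exact (Option.some.inj this)

theorem pv_adict_append (l : List (String × String)) (e : String × String) (x : String) :
    (pvADict (l ++ [e])).get? x
      = if x = e.1 then some (l.length : Int) else (pvADict l).get? x := by
  unfold pvADict
  rw [PySem.List.enumerate_append, List.foldl_append]
  simp only [PySem.List.enumerate_cons, PySem.List.enumerate_nil, List.foldl_cons,
    List.foldl_nil]
  rw [PySem.Dict.get?_insert]
  simp

theorem pv_bfold_append (j : Int) (l : List (String × String)) (e : String × String) :
    pvBFold j (l ++ [e]) = pvBStep j (pvBFold j l) ((l.length : Int), e) := by
  unfold pvBFold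
  rw [PySem.List.enumerate_append, List.foldl_append]
  simp [PySem.List.enumerate_cons, PySem.List.enumerate_nil]

theorem pv_mem_take {c : String} {j : Nat} (hj : j ≤ 28) (h : c ∈ bidsEntityOrder.take j) :
    ∃ r, r < j ∧ c = pvOKey r := by
  obtain ⟨t, ht, hc⟩ := List.mem_iff_getElem.mp h
  have htj : t < j := by
    have h1 := List.length_take_le j bidsEntityOrder
    omega
  have ht28 : t < 28 := lt_of_lt_of_le htj hj
  refine ⟨t, htj, ?_⟩
  rw [← hc, List.getElem_take]
  have h2 := pv_getElem?_okey t ht28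
  rw [List.getElem?_eq_getElem (by rw [pv_len_order]; exact ht28)] at h2
  exact Option.some.inj h2

theorem pv_take_decomp {r j : Nat} (hr : r < j) (hj : j ≤ 28) :
    bidsEntityOrder.take j
      = bidsEntityOrder.take r ++ pvOKey r :: (bidsEntityOrder.take j).drop (r + 1) := by
  have h1 := (List.take_append_drop (r + 1) (bidsEntityOrder.take j)).symm
  have h2 : (bidsEntityOrder.take j).take (r + 1) = bidsEntityOrder.take (r + 1) := by
    rw [List.take_take]
    congr 1
    omega
  have h3 : bidsEntityOrder.take (r + 1) = bidsEntityOrder.take r ++ [pvOKey r] := by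
    rw [List.take_add_one, pv_getElem?_okey r (lt_of_lt_of_le hr hj)]
    rfl
  rw [h2, h3] at h1
  simpa using h1

theorem pv_mem_seg {c : String} {r j : Nat} (hr : r < j) (hj : j ≤ 28)
    (h : c ∈ (bidsEntityOrder.take j).drop (r + 1)) :
    ∃ r', r < r' ∧ r' < j ∧ c = pvOKey r' := by
  obtain ⟨t, ht, hc⟩ := List.mem_iff_getElem.mp h
  have hlen : (bidsEntityOrder.take j).length = j :=
    List.length_take_of_le (by rw [pv_len_order]; omega)
  have htj : r + 1 + t < j := by
    rw [List.length_drop, hlen] at ht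
    omega
  refine ⟨r + 1 + t, by omega, htj, ?_⟩
  rw [← hc, List.getElem_drop, List.getElem_take]
  have h28 : r + 1 + t < 28 := lt_of_lt_of_le htj hj
  have h2 := pv_getElem?_okey _ h28
  rw [List.getElem?_eq_getElem (by rw [pv_len_order]; exact h28)] at h2
  exact Option.some.inj h2

theorem pvALoop_none (d : PySem.Dict String Int) (cs : List String)
    (h : ∀ c ∈ cs, d.get? c = none) : pvALoop d cs = 0 := by
  induction cs with
  | nil => rfl
  | cons c rest ih =>
    have hc := h c (by simp)
    simp only [pvALoop, hc]
    exact ih (fun c' hc' => h c' (by simp [hc']))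

theorem pvALoop_hit (d : PySem.Dict String Int) (cs1 cs2 : List String) (c : String) (i : Int)
    (h1 : ∀ c' ∈ cs1, d.get? c' = none) (hc : d.get? c = some i) :
    pvALoop d (cs1 ++ c :: cs2) = i + 1 := by
  induction cs1 with
  | nil => simp [pvALoop, hc]
  | cons a rest ih =>
    have ha := h1 a (by simp)
    simp only [List.cons_append, pvALoop, ha]
    exact ih (fun c' hc' => h1 c' (by simp [hc']))

-- the invariant tying B's fold state to A's dict
def pvInv (j : Nat) (l : List (String × String)) : Prop :=
  (pvBFold (j : Int) l = (-1, -1) ∧ ∀ r, r < j → (pvADict l).get? (pvOKey r) = none)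
  ∨ (∃ r i : Nat, pvBFold (j : Int) l = ((r : Int), (i : Int)) ∧ r < j
      ∧ (pvADict l).get? (pvOKey r) = some (i : Int)
      ∧ ∀ r', r < r' → r' < j → (pvADict l).get? (pvOKey r') = none)

theorem pv_inv (j : Nat) (hj : j ≤ 28) (l : List (String × String)) : pvInv j l := by
  unfold pvInv
  induction l using List.reverseRecOn with
  | nil =>
      left
      constructor
      · rfl
      · intro r _
        simp [pvADict, PySem.List.enumerate_nil, PySem.Dict.get?_empty]
  | append_singleton l e ih =>
      have hb := pv_bfold_append (j : Int) l e
      cases hrk : bidsRank.get? e.1 with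
      | none =>
          have hstep : pvBStep (j : Int) (pvBFold (j : Int) l) ((l.length : Int), e)
              = pvBFold (j : Int) l := by
            simp only [pvBStep, hrk]
          have hne : ∀ r', r' < j → pvOKey r' ≠ e.1 := by
            intro r' hr' heq
            rw [← heq, pv_rank_okey r' (lt_of_lt_of_le hr' hj)] at hrk
            exact Option.some_ne_none _ hrk
          rcases ih with ⟨h0, hnone⟩ | ⟨rs, is, hst, hrs, hget, hnone⟩
          · left
            refine ⟨by rw [hb, hstep, h0], fun r hr => ?_⟩
            rw [pv_adict_append, if_neg (hne r hr), hnone r hr]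
          · right
            refine ⟨rs, is, by rw [hb, hstep, hst], hrs, ?_, fun r' h1 h2 => ?_⟩
            · rw [pv_adict_append, if_neg (hne rs hrs), hget]
            · rw [pv_adict_append, if_neg (hne r' h2), hnone r' h1 h2]
      | some ri =>
          obtain ⟨r, rfl, hr28, hke⟩ := pv_rank_some hrk
          by_cases hrj : r < j
          · have hne : ∀ r'', r'' < 28 → r'' ≠ r → pvOKey r'' ≠ e.1 := by
              intro r'' h28 hner heq
              exact hner (pv_okey_inj h28 hr28 (by rw [heq, hke]))
            have heq : pvOKey r = e.1 := hke.symm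
            rcases ih with ⟨h0, hnone⟩ | ⟨rs, is, hst, hrs, hget, hnone⟩
            · -- state was (-1,-1): take (r, len)
              have hstep : pvBStep (j : Int) (pvBFold (j : Int) l) ((l.length : Int), e)
                  = ((r : Int), (l.length : Int)) := by
                simp only [pvBStep, hrk, h0]
                rw [if_pos ⟨by exact_mod_cast hrj, by norm_num⟩]
              right
              refine ⟨r, l.length, by rw [hb, hstep], hrj, ?_, fun r' h1 h2 => ?_⟩
              · rw [pv_adict_append, if_pos heq]
              · rw [pv_adict_append,
                  if_neg (hne r' (lt_of_lt_of_le h2 hj) (by omega)),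
                  hnone r' h2]
            · by_cases hle : rs ≤ r
              · have hstep : pvBStep (j : Int) (pvBFold (j : Int) l) ((l.length : Int), e)
                    = ((r : Int), (l.length : Int)) := by
                  simp only [pvBStep, hrk, hst]
                  rw [if_pos ⟨by exact_mod_cast hrj, by exact_mod_cast hle⟩]
                right
                refine ⟨r, l.length, by rw [hb, hstep], hrj, ?_, fun r' h1 h2 => ?_⟩
                · rw [pv_adict_append, if_pos heq]
                · rw [pv_adict_append,
                    if_neg (hne r' (lt_of_lt_of_le h2 hj) (by omega))]
                  rcases Nat.lt_or_ge rs r' with h3 | h3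
                  · exact hnone r' h3 h2
                  · omega
              · have hstep : pvBStep (j : Int) (pvBFold (j : Int) l) ((l.length : Int), e)
                    = pvBFold (j : Int) l := by
                  simp only [pvBStep, hrk, hst]
                  rw [if_neg (fun hc => hle (by exact_mod_cast hc.2))]
                right
                refine ⟨rs, is, by rw [hb, hstep, hst], hrs, ?_, fun r' h1 h2 => ?_⟩
                · rw [pv_adict_append,
                    if_neg (hne rs (lt_of_lt_of_le hrs hj) (by omega)), hget]
                · rw [pv_adict_append,
                    if_neg (hne r' (lt_of_lt_of_le h2 hj) (by omega)),
                    hnone r' h1 h2]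
          · -- r ≥ j: condition false, dict key okey r is never queried
            have hstep : pvBStep (j : Int) (pvBFold (j : Int) l) ((l.length : Int), e)
                = pvBFold (j : Int) l := by
              simp only [pvBStep, hrk]
              rw [if_neg (fun hc => hrj (by exact_mod_cast hc.1))]
            have hne : ∀ r', r' < j → pvOKey r' ≠ e.1 := by
              intro r' hr' heq
              exact hrj (by
                have := pv_okey_inj (lt_of_lt_of_le hr' hj) hr28 (by rw [heq, hke])
                omega)
            rcases ih with ⟨h0, hnone⟩ | ⟨rs, is, hst, hrs, hget, hnone⟩
            · left
              refine ⟨by rw [hb, hstep, h0], fun r' hr' => ?_⟩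
              rw [pv_adict_append, if_neg (hne r' hr'), hnone r' hr']
            · right
              refine ⟨rs, is, by rw [hb, hstep, hst], hrs, ?_, fun r' h1 h2 => ?_⟩
              · rw [pv_adict_append, if_neg (hne rs hrs), hget]
              · rw [pv_adict_append, if_neg (hne r' h2), hnone r' h1 h2]

theorem pv_main (j : Nat) (hj : j ≤ 28) (l : List (String × String)) :
    pvALoop (pvADict l) ((bidsEntityOrder.take j).reverse)
      = (if (pvBFold (j : Int) l).2 ≥ 0 then (pvBFold (j : Int) l).2 + 1 else 0) := by
  rcases pv_inv j hj l with ⟨h0, hnone⟩ | ⟨r, i, hst, hrj, hget, hnone⟩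
  · rw [h0]
    norm_num
    apply pvALoop_none
    intro c hc
    obtain ⟨r, hr, rfl⟩ := pv_mem_take hj (List.mem_reverse.mp hc)
    exact hnone r hr
  · rw [hst]
    rw [if_pos (by positivity)]
    rw [pv_take_decomp hrj hj]
    rw [List.reverse_append, List.reverse_cons, List.append_assoc]
    simp only [List.singleton_append]
    apply pvALoop_hit _ _ _ _ _ _ hget
    intro c hc
    obtain ⟨r', h1, h2, rfl⟩ := pv_mem_seg hrj hj (List.mem_reverse.mp hc)
    exact hnone r' h1 h2

-- ===== VERDICT (by name: the statement is the Claim_ definition above) =====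
theorem find_insertion_position_py_spec : Claim_equal_find_insertion_position_py := by
  intro l key _
  unfold Spec_find_insertion_position_py find_insertion_position_py find_insertion_position_py_alt
  rw [pv_rank_eq]
  cases h : PySem.List.index? bidsEntityOrder key with
  | none => simp
  | some j =>
    have hj : j ≤ 28 := by
      obtain ⟨hk, -, -⟩ := PySem.List.getElem_of_index?_eq_some h
      exact Nat.le_of_lt (by simpa [bidsEntityOrder] using hk)
    simp only [Option.map_some]
    rw [PySem.List.slice_to_natCast]
    exact pv_main j hj l
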